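-- pv_equiv track=rewrite | github.com/git-cola/git-cola | cola/display.py | shorten_paths
-- ===== SOURCE A (Python) =====
-- import collections
--
-- def shorten_paths(source_paths):
--     """Shorten a sequence of paths into unique strings for display"""
--     result = {}
--     # Start by assuming that all paths are in conflict.
--     # On each iteration we will collect all the path suffixes, move the newly
--     # unique entries to the result, and repeat until no conflicts remain.
--     count = 0
--     conflicts = list(source_paths)
--     in_conflict = True
--     while in_conflict:
--         count += 1
--         # Gather the suffixes for the current paths in conflict
--         suffixes = collections.defaultdict(list)
--         for path in conflicts:
--             suffix = path_suffix(path, count)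
--             suffixes[suffix].append(path)
--
--         # Loop over the suffixes to gather new conflicts and unique entries.
--         conflicts = []
--         in_conflict = False
--
--         for suffix, paths in suffixes.items():
--             # If only a single path exists for the suffix then no conflict
--             # exists, and the suffix is valid.
--             if len(paths) == 1:
--                 result[paths[0]] = suffix
--             # If this loop runs too long then bail out by using the full path.
--             elif count >= 128:
--                 for path in paths:
--                     result[path] = path
--             # If multiple paths map to the same suffix then the paths are
--             # considered in conflict, and will be reprocessed.
--             else:
--                 conflicts.extend(paths)
--                 in_conflict = True
--
--     return result
--
-- def path_suffix(path, count):
--     """Return `count` number of trailing path components"""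
--     path = normalize_path(path)
--     components = path.split('/')[-count:]
--     return '/'.join(components)
--
-- def normalize_path(path):
--     """Normalize a path so that only "/" is used as a separator"""
--     return path.replace('\\', '/')
-- ===== SOURCE B (Python) =====
-- def shorten_paths(source_paths):
--     """Shorten a sequence of paths into unique strings for display"""
--     result = {}
--     # One list of conflict groups; each entry keeps its pre-split components.
--     # Start with a single group holding every path (split once, up front).
--     groups = [[(path.replace('\\', '/').split('/'), path) for path in source_paths]]
--     count = 0
--     while groups:
--         count += 1
--         next_groups = []
--         for group in groups:
--             # Refine this group by one more trailing component: members that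
--             # ran out of components (key None) keep their whole path.
--             buckets = {}
--             for comps, path in group:
--                 key = comps[-count] if count <= len(comps) else None
--                 buckets.setdefault(key, []).append((comps, path))
--             for bucket in buckets.values():
--                 if len(bucket) == 1:
--                     comps, path = bucket[0]
--                     result[path] = '/'.join(comps[-count:])
--                 elif count >= 128:
--                     for _, path in bucket:
--                         result[path] = path
--                 else:
--                     next_groups.append(bucket)
--         groups = next_groups
--     return result
-- ===== Notes on version B (the rewrite author's own statement) =====
-- stated objective: faster
-- what changed: B replaces A's global fixpoint (re-normalize, re-split and re-hash every still-conflicting path against all others each round) with a trie-style breadth-first refinement: paths are normalized and split once, and each conflict group is independently partitioned by its single next trailing component (not a recomputed full-suffix string), joining a suffix only when an entry is emitted.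
import Mathlib
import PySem

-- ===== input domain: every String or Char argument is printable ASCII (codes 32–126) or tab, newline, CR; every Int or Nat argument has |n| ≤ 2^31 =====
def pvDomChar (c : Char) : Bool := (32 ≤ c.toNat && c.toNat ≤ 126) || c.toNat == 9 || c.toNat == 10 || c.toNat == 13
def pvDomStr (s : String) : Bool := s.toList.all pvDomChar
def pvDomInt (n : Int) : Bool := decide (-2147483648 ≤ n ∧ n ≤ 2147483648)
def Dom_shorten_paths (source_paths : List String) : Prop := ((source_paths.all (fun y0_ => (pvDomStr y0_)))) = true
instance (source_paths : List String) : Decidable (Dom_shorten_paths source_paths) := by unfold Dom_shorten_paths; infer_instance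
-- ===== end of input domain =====

-- B replaces A's global per-round re-normalize/re-split/full-suffix hashing with a breadth-first
-- refinement of independent conflict groups keyed by one trailing component at a time
-- (constant-factor faster: the per-round work per path drops from full-string processing to one component).

-- ===== PORT A =====

-- path.split('/'): the separator is the non-empty literal "/", so Python never raises; exact via Chars.splitOn
def splitSlash (s : String) : List String :=
  (PySem.Chars.splitOn s.toList "/".toList).map String.ofList

def normalize_path (path : String) : String :=
  PySem.Str.replace path "\\" "/"

def path_suffix (path : String) (count : Nat) : String :=
  let path := normalize_path path
  let components := PySem.List.slice (splitSlash path) (some (-(count : Int))) none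
  PySem.Str.join "/" components

-- one entry of the `for suffix, paths in suffixes.items()` loop body
def shortenStep (count : Nat)
    (st : List String × Bool × PySem.Dict String String)
    (item : String × List String) : List String × Bool × PySem.Dict String String :=
  if item.2.length = 1 then
    (st.1, st.2.1, st.2.2.insert (PySem.List.pyGetD item.2 0 "") item.1)
  else if 128 ≤ count then
    (st.1, st.2.1, item.2.foldl (fun r path => r.insert path path) st.2.2)
  else
    (st.1 ++ item.2, true, st.2.2)

-- the `while in_conflict` loop; fuel is only a termination guard (the loop runs at most 128 rounds)
def shortenLoop : Nat → Nat → List String → PySem.Dict String String → PySem.Dict String String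
  | 0, _, _, result => result
  | fuel + 1, count, conflicts, result =>
    let count := count + 1
    let suffixes : PySem.Dict String (List String) :=
      conflicts.foldl (fun d path => d.modify (path_suffix path count) [] (· ++ [path])) PySem.Dict.empty
    let r := suffixes.items.foldl (shortenStep count) ([], false, result)
    if r.2.1 then shortenLoop fuel count r.1 r.2.2 else r.2.2

def shorten_paths (source_paths : List String) : List (String × String) :=
  (shortenLoop 129 0 source_paths PySem.Dict.empty).items

-- ===== PORT B =====

-- `comps[-count] if count <= len(comps) else None`
def altKey (count : Nat) (comps : List String) : Option String :=
  if count ≤ comps.length then some (PySem.List.pyGetD comps (-(count : Int)) "") else none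

-- body of `for group in groups`: bucket by the next trailing component, then dispatch the buckets
def altGroupStep (count : Nat)
    (st : List (List (List String × String)) × PySem.Dict String String)
    (group : List (List String × String)) :
    List (List (List String × String)) × PySem.Dict String String :=
  let buckets : PySem.Dict (Option String) (List (List String × String)) :=
    group.foldl (fun d e => d.modify (altKey count e.1) [] (· ++ [e])) PySem.Dict.empty
  buckets.values.foldl (fun st bucket =>
    if bucket.length = 1 then
      let e := PySem.List.pyGetD bucket 0 ([], "")
      (st.1, st.2.insert e.2 (PySem.Str.join "/" (PySem.List.slice e.1 (some (-(count : Int))) none)))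
    else if 128 ≤ count then
      (st.1, bucket.foldl (fun r e => r.insert e.2 e.2) st.2)
    else
      (st.1 ++ [bucket], st.2)) st

-- the `while groups` loop; fuel is only a termination guard (at most 128 rounds)
def altLoop : Nat → Nat → List (List (List String × String)) → PySem.Dict String String → PySem.Dict String String
  | 0, _, _, result => result
  | fuel + 1, count, groups, result =>
    if groups.isEmpty then result
    else
      let r := groups.foldl (altGroupStep (count + 1)) ([], result)
      altLoop fuel (count + 1) r.1 r.2

def shorten_paths_alt (source_paths : List String) : List (String × String) :=
  (altLoop 129 0 [source_paths.map (fun path => (splitSlash (PySem.Str.replace path "\\" "/"), path))]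
    PySem.Dict.empty).items

-- ===== PRECONDITION & SPEC =====
def Spec_shorten_paths (source_paths : List String) (out : List (String × String)) : Prop := out = shorten_paths_alt source_paths
instance (source_paths : List String) (out : List (String × String)) : Decidable (Spec_shorten_paths source_paths out) := by unfold Spec_shorten_paths; infer_instance

-- ===== CLAIM (what is proved, stated in full; the proofs are below) =====
def Claim_equal_shorten_paths : Prop := ∀ (source_paths : List String), Dom_shorten_paths source_paths → Spec_shorten_paths source_paths (shorten_paths source_paths)

-- ===== LEMMAS AND PROOFS =====

abbrev Entry : Type := List String × String
abbrev GroupsT : Type := List (List Entry)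

-- the trailing `c` components of a component list (what both ports' suffixes denote)
def sfx (c : Nat) (comps : List String) : List String := comps.drop (comps.length - c)

def optList (L : List String) : Option String → List String
  | some a => a :: L
  | none => L

def defEntry : Entry := ([], "")

def Lof (c : Nat) (g : List Entry) : List String := sfx c ((g.headD defEntry).1)

def k1 (c : Nat) (e : Entry) : String := path_suffix e.2 c

def k2 (c : Nat) (e : Entry) : Option String := altKey c e.1

-- items of a grouping fold, in closed form
def blockExpr {κ β ν : Type} [BEq κ] (key : β → κ) (val : β → ν) (l : List β) : List (κ × List ν) :=
  (PySem.Set.ofList (l.map key)).map (fun k => (k, (l.filter (fun x => key x == k)).map val))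

-- A's items for one conflict group, translated from B's buckets
def tb (c : Nat) (g : List Entry) : List (String × List String) :=
  (blockExpr (k2 (c + 1)) id g).map (fun p => (PySem.Str.join "/" (optList (Lof c g) p.1), p.2.map Prod.snd))

def EntOk (e : Entry) : Prop := e.1 = splitSlash (normalize_path e.2) ∧ e.1 ≠ []

def distinctAt (c : Nat) (g h : List Entry) : Prop := ∀ e ∈ g, ∀ f ∈ h, sfx c e.1 ≠ sfx c f.1

def RoundInv (c : Nat) (gs : GroupsT) : Prop :=
  (∀ g ∈ gs, ∀ e ∈ g, EntOk e) ∧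
  (∀ g ∈ gs, ∀ e ∈ g, ∀ f ∈ g, sfx c e.1 = sfx c f.1) ∧
  gs.Pairwise (distinctAt c)

-- B's inner loop body, named for the proofs
def bStep (count : Nat) (st : GroupsT × PySem.Dict String String) (bucket : List Entry) :
    GroupsT × PySem.Dict String String :=
  if bucket.length = 1 then
    let e := PySem.List.pyGetD bucket 0 ([], "")
    (st.1, st.2.insert e.2 (PySem.Str.join "/" (PySem.List.slice e.1 (some (-(count : Int))) none)))
  else if 128 ≤ count then
    (st.1, bucket.foldl (fun r e => r.insert e.2 e.2) st.2)
  else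
    (st.1 ++ [bucket], st.2)

theorem sfx_sfx (c : Nat) (comps : List String) : sfx c (sfx (c + 1) comps) = sfx c comps := by
  simp only [sfx, List.drop_drop, List.length_drop]
  congr 1
  omega

theorem sfx_succ_ne_nil (c : Nat) (comps : List String) (h : comps ≠ []) : sfx (c + 1) comps ≠ [] := by
  have hl : comps.length ≠ 0 := fun h0 => h (List.length_eq_zero_iff.mp h0)
  intro hnil
  have := congrArg List.length hnil
  simp only [sfx, List.length_drop, List.length_nil] at this
  omega

theorem mem_sfx {x : String} {c : Nat} {comps : List String} (h : x ∈ sfx c comps) : x ∈ comps :=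
  List.mem_of_mem_drop h

theorem go_no_slash : ∀ (fuel : Nat) (l cur : List Char) (acc : List (List Char)),
    l.length < fuel → ('/' : Char) ∉ cur →
    (∀ p ∈ acc, ('/' : Char) ∉ p) →
    ∀ p ∈ PySem.Chars.splitOn.go "/".toList fuel l cur acc, ('/' : Char) ∉ p := by
  intro fuel
  induction fuel with
  | zero => intro l cur acc h; omega
  | succ fuel ih =>
    intro l cur acc hlen hcur hacc p hp
    match l with
    | [] =>
      simp only [PySem.Chars.splitOn.go] at hp
      simp only [List.mem_reverse, List.mem_cons] at hp
      rcases hp with h | h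
      · subst h; simpa using hcur
      · exact hacc _ h
    | c :: rest =>
      simp only [PySem.Chars.splitOn.go] at hp
      by_cases hpre : "/".toList.isPrefixOf (c :: rest) = true
      · rw [if_pos hpre] at hp
        have hp' : p ∈ PySem.Chars.splitOn.go "/".toList fuel rest [] (cur.reverse :: acc) := by
          simpa using hp
        refine ih rest [] (cur.reverse :: acc) (by simp only [List.length_cons] at hlen; omega) (by simp) ?_ p hp'
        intro q hq
        simp only [List.mem_cons] at hq
        rcases hq with h | h
        · subst h; simpa using hcur
        · exact hacc _ h
      · rw [if_neg hpre] at hp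
        have hc : c ≠ '/' := by
          intro h; apply hpre; simp [List.isPrefixOf, h]
        refine ih _ _ _ (by simp only [List.length_cons] at hlen; omega) ?_ hacc p hp
        intro h
        simp only [List.mem_cons] at h
        rcases h with h | h
        · exact hc h.symm
        · exact hcur h

theorem splitSlash_no_slash (s : String) : ∀ p ∈ splitSlash s, ('/' : Char) ∉ p.toList := by
  intro p hp
  simp only [splitSlash, List.mem_map] at hp
  obtain ⟨cs, hcs, rfl⟩ := hp
  have := go_no_slash (s.toList.length + 1) s.toList [] [] (by omega) (by simp) (by simp) cs
  rw [String.toList_ofList]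
  exact this hcs

theorem go_ne_nil : ∀ (fuel : Nat) (l cur : List Char) (acc : List (List Char)),
    PySem.Chars.splitOn.go "/".toList fuel l cur acc ≠ [] := by
  intro fuel
  induction fuel with
  | zero => intro l cur acc; simp [PySem.Chars.splitOn.go]
  | succ fuel ih =>
    intro l cur acc
    match l with
    | [] => simp [PySem.Chars.splitOn.go]
    | c :: rest =>
      simp only [PySem.Chars.splitOn.go]
      split
      · exact ih _ _ _
      · exact ih _ _ _

theorem splitSlash_ne_nil (s : String) : splitSlash s ≠ [] := by
  simp only [splitSlash, ne_eq, List.map_eq_nil_iff]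
  exact go_ne_nil _ _ _ _

theorem slash_cancel : ∀ (a : List Char), ('/' : Char) ∉ a → ∀ (b : List Char), ('/' : Char) ∉ b →
    ∀ u v : List Char, a ++ '/' :: u = b ++ '/' :: v → a = b ∧ u = v := by
  intro a
  induction a with
  | nil =>
    intro _ b hb u v h
    match b with
    | [] => simpa using h
    | x :: b' =>
      exfalso
      simp only [List.nil_append, List.cons_append, List.cons.injEq] at h
      exact hb (h.1 ▸ List.mem_cons_self)
  | cons x a' ih =>
    intro ha b hb u v h
    match b with
    | [] =>
      exfalso
      simp only [List.cons_append, List.nil_append, List.cons.injEq] at h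
      exact ha (h.1 ▸ List.mem_cons_self)
    | y :: b' =>
      simp only [List.cons_append, List.cons.injEq] at h
      obtain ⟨rfl, h2⟩ := h
      obtain ⟨rfl, rfl⟩ := ih (fun hm => ha (List.mem_cons_of_mem _ hm)) b'
        (fun hm => hb (List.mem_cons_of_mem _ hm)) u v h2
      exact ⟨rfl, rfl⟩

theorem chars_join_inj : ∀ (l1 l2 : List (List Char)),
    (∀ p ∈ l1, ('/' : Char) ∉ p) → (∀ p ∈ l2, ('/' : Char) ∉ p) → l1 ≠ [] → l2 ≠ [] →
    PySem.Chars.join ['/'] l1 = PySem.Chars.join ['/'] l2 → l1 = l2 := by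
  intro l1
  induction l1 with
  | nil => intro l2 _ _ h; exact absurd rfl h
  | cons p t ih =>
    intro l2 h1 h2 _ n2 hj
    match l2 with
    | [] => exact absurd rfl n2
    | q :: s =>
      match t, s with
      | [], [] =>
        rw [PySem.Chars.join_singleton, PySem.Chars.join_singleton] at hj
        rw [hj]
      | [], b :: s' =>
        exfalso
        rw [PySem.Chars.join_singleton, PySem.Chars.join_cons_cons] at hj
        have : ('/' : Char) ∈ p := by
          rw [hj]; simp
        exact h1 p (by simp) this
      | a :: t', [] =>
        exfalso
        rw [PySem.Chars.join_singleton, PySem.Chars.join_cons_cons] at hj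
        have : ('/' : Char) ∈ q := by
          rw [← hj]; simp
        exact h2 q (by simp) this
      | a :: t', b :: s' =>
        rw [PySem.Chars.join_cons_cons, PySem.Chars.join_cons_cons] at hj
        simp only [List.append_assoc, List.singleton_append] at hj
        obtain ⟨rfl, hrest⟩ := slash_cancel p (h1 p (by simp)) q (h2 q (by simp)) _ _ hj
        have := ih (b :: s') (fun r hr => h1 r (List.mem_cons_of_mem _ hr))
          (fun r hr => h2 r (List.mem_cons_of_mem _ hr)) (by simp) (by simp) hrest
        rw [this]

theorem join_inj (l1 l2 : List String)
    (h1 : ∀ p ∈ l1, ('/' : Char) ∉ p.toList) (h2 : ∀ p ∈ l2, ('/' : Char) ∉ p.toList)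
    (n1 : l1 ≠ []) (n2 : l2 ≠ []) (h : PySem.Str.join "/" l1 = PySem.Str.join "/" l2) : l1 = l2 := by
  have hc : PySem.Chars.join "/".toList (l1.map String.toList)
      = PySem.Chars.join "/".toList (l2.map String.toList) := by
    have := congrArg String.toList h
    simpa [PySem.Str.join] using this
  have : l1.map String.toList = l2.map String.toList := by
    refine chars_join_inj _ _ ?_ ?_ (by simpa using n1) (by simpa using n2) (by simpa using hc)
    · intro p hp; simp only [List.mem_map] at hp; obtain ⟨x, hx, rfl⟩ := hp; exact h1 x hx
    · intro p hp; simp only [List.mem_map] at hp; obtain ⟨x, hx, rfl⟩ := hp; exact h2 x hx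
  exact List.map_injective_iff.mpr (fun a b hab => by
    have := congrArg String.ofList hab; simpa using this) this

theorem groupItems {κ β ν : Type} [BEq κ] [LawfulBEq κ] (l : List β) (key : β → κ) (val : β → ν) :
    (l.foldl (fun d x => d.modify (key x) [] (· ++ [val x])) PySem.Dict.empty).items
    = blockExpr key val l := by
  have hpair : ∀ (e : PySem.Dict κ (List ν)), l.foldl (fun d x => d.modify (key x) [] (· ++ [val x])) e
      = (l.map (fun x => (key x, val x))).foldl (fun d p => d.modify p.1 [] (· ++ [p.2])) e := by
    intro e; rw [List.foldl_map]
  have hkeys : (l.foldl (fun d x => d.modify (key x) [] (· ++ [val x])) PySem.Dict.empty).keys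
      = PySem.Set.ofList (l.map key) := by
    rw [PySem.Dict.keys_foldl_modify_key]
    simp [PySem.Set.update_nil_left]
  have hnd : (l.foldl (fun d x => d.modify (key x) [] (· ++ [val x])) PySem.Dict.empty).keys.Nodup := by
    exact PySem.Dict.nodup_keys_foldl_modify_key l key [] _ PySem.Dict.empty (by simp)
  have hgetD : ∀ k, (l.foldl (fun d x => d.modify (key x) [] (· ++ [val x])) PySem.Dict.empty).getD k []
      = (l.filter (fun x => key x == k)).map val := by
    intro k
    rw [hpair, PySem.Dict.getD_foldl_modify_append, List.filter_map]
    simp [Function.comp_def]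
  rw [PySem.Dict.items_eq_map_keys _ hnd [], hkeys]
  simp only [hgetD]
  rfl

theorem groupItems_id {κ β : Type} [BEq κ] [LawfulBEq κ] (l : List β) (key : β → κ) :
    (l.foldl (fun d x => d.modify (key x) [] (· ++ [x])) PySem.Dict.empty).items
    = blockExpr key id l :=
  groupItems l key id

theorem blockAppend {κ β ν : Type} [BEq κ] [LawfulBEq κ] (key : β → κ) (val : β → ν)
    (l1 l2 : List β) (hd : ∀ x ∈ l1, ∀ y ∈ l2, key x ≠ key y) :
    blockExpr key val (l1 ++ l2) = blockExpr key val l1 ++ blockExpr key val l2 := by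
  unfold blockExpr
  have hof : PySem.Set.ofList ((l1 ++ l2).map key)
      = PySem.Set.ofList (l1.map key) ++ PySem.Set.ofList (l2.map key) := by
    rw [List.map_append, PySem.Set.ofList_append, PySem.Set.update_eq_append_filter]
    congr 1
    refine List.filter_eq_self.mpr ?_
    intro k hk
    have hk2 : ∃ y ∈ l2, key y = k := by
      have := (PySem.Set.mem_ofList _ _).mp hk; simpa using this
    obtain ⟨y, hy, rfl⟩ := hk2
    simp only [PySem.Set.contains_eq_listContains, Bool.not_eq_eq_eq_not, Bool.not_true]
    simp only [List.contains_eq_mem, decide_eq_false_iff_not, PySem.Set.mem_ofList, List.mem_map]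
    rintro ⟨x, hx, hxy⟩
    exact hd x hx y hy hxy
  rw [hof, List.map_append]
  congr 1
  · refine List.map_congr_left ?_
    intro k hk
    have hk' : ∃ x ∈ l1, key x = k := by
      have := (PySem.Set.mem_ofList _ _).mp hk; simpa using this
    obtain ⟨x, hx, rfl⟩ := hk'
    rw [List.filter_append]
    have : l2.filter (fun y => key y == key x) = [] := by
      refine List.filter_eq_nil_iff.mpr ?_
      intro y hy
      simpa using (hd x hx y hy).symm
    rw [this, List.append_nil]
  · refine List.map_congr_left ?_
    intro k hk
    have hk' : ∃ y ∈ l2, key y = k := by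
      have := (PySem.Set.mem_ofList _ _).mp hk; simpa using this
    obtain ⟨y, hy, rfl⟩ := hk'
    rw [List.filter_append]
    have : l1.filter (fun x => key x == key y) = [] := by
      refine List.filter_eq_nil_iff.mpr ?_
      intro x hx
      simpa using hd x hx y hy
    rw [this, List.nil_append]

theorem blockFlatten {κ β ν : Type} [BEq κ] [LawfulBEq κ] (key : β → κ) (val : β → ν) :
    ∀ (gs : List (List β)),
    gs.Pairwise (fun g h => ∀ x ∈ g, ∀ y ∈ h, key x ≠ key y) →
    blockExpr key val gs.flatten = (gs.map (blockExpr key val)).flatten := by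
  intro gs
  induction gs with
  | nil => intro _; simp [blockExpr]
  | cons g gs ih =>
    intro hp
    rw [List.pairwise_cons] at hp
    rw [List.flatten_cons, blockAppend key val g gs.flatten ?_, List.map_cons, List.flatten_cons,
      ih hp.2]
    intro x hx y hy
    rw [List.mem_flatten] at hy
    obtain ⟨h, hh, hyh⟩ := hy
    exact hp.1 h hh x hx y hyh

theorem ofList_map_inj {α β : Type} [BEq α] [LawfulBEq α] [BEq β] [LawfulBEq β] (φ : α → β) :
    ∀ (l : List α), (∀ a ∈ l, ∀ b ∈ l, φ a = φ b → a = b) →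
    PySem.Set.ofList (l.map φ) = (PySem.Set.ofList l).map φ := by
  intro l
  induction l using List.reverseRecOn with
  | nil => simp
  | append_singleton t a ih =>
    intro hinj
    rw [List.map_append, List.map_singleton, PySem.Set.ofList_append_singleton,
      PySem.Set.ofList_append_singleton,
      ih (fun x hx y hy => hinj x (by simp [hx]) y (by simp [hy]))]
    rw [PySem.Set.add_eq_ite, PySem.Set.add_eq_ite]
    by_cases hmem : a ∈ PySem.Set.ofList t
    · rw [if_pos hmem, if_pos]
      simp only [List.mem_map]
      exact ⟨a, hmem, rfl⟩
    · rw [if_neg hmem, if_neg, List.map_append, List.map_singleton]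
      simp only [List.mem_map]
      rintro ⟨b, hb, hba⟩
      exact hmem (hinj b (by simp [(PySem.Set.mem_ofList _ _).mp hb]) a (by simp) hba ▸ hb)

-- A's suffix of an entry is the join of the entry's stored trailing components
theorem suffix_eq (c : Nat) (e : Entry) (h : e.1 = splitSlash (normalize_path e.2)) :
    k1 (c + 1) e = PySem.Str.join "/" (sfx (c + 1) e.1) := by
  show PySem.Str.join "/" (PySem.List.slice (splitSlash (normalize_path e.2)) (some (-((c + 1 : Nat) : Int))) none) = _
  rw [← h, PySem.List.slice_from_neg_natCast e.1 (c + 1) (by omega)]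
  rfl

-- B's bucket key determines the next suffix component list
theorem sfx_succ_optList (c : Nat) (comps : List String) :
    sfx (c + 1) comps = optList (sfx c comps) (altKey (c + 1) comps) := by
  unfold altKey
  by_cases hle : c + 1 ≤ comps.length
  · rw [if_pos hle, PySem.List.pyGetD_neg_natCast comps (c + 1) "" (by omega) hle]
    unfold optList sfx
    rw [List.drop_eq_getElem_cons (show comps.length - (c + 1) < comps.length by omega)]
    congr 2
    omega
  · rw [if_neg hle]
    unfold optList sfx
    have h1 : comps.length - (c + 1) = 0 := by omega
    have h2 : comps.length - c = 0 := by omega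
    rw [h1, h2]

theorem optList_inj (L : List String) {k k' : Option String}
    (h : optList L k = optList L k') : k = k' := by
  match k, k' with
  | some a, some b => simp only [optList, List.cons.injEq] at h; rw [h.1]
  | some a, none =>
    exfalso; have := congrArg List.length h; simp [optList] at this
  | none, some b =>
    exfalso; have := congrArg List.length h; simp [optList] at this
  | none, none => rfl

theorem entry_slashfree (e : Entry) (hok : EntOk e) : ∀ p ∈ e.1, ('/' : Char) ∉ p.toList := by
  intro p hp
  exact splitSlash_no_slash _ p (hok.1 ▸ hp)

-- distinct trailing runs keep distinct suffix strings one level deeper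
theorem k1_cross (c : Nat) (e f : Entry) (hoke : EntOk e) (hokf : EntOk f)
    (hne : sfx (c + 1) e.1 ≠ sfx (c + 1) f.1) : k1 (c + 1) e ≠ k1 (c + 1) f := by
  rw [suffix_eq c e hoke.1, suffix_eq c f hokf.1]
  intro hj
  exact hne (join_inj _ _ (fun p hp => entry_slashfree e hoke p (mem_sfx hp))
    (fun p hp => entry_slashfree f hokf p (mem_sfx hp))
    (sfx_succ_ne_nil c e.1 hoke.2) (sfx_succ_ne_nil c f.1 hokf.2) hj)

-- within a group, B's bucket key names A's suffix: they produce the same component run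
theorem optList_sfx (c : Nat) (g : List Entry) (e : Entry) (he : e ∈ g)
    (hsh : ∀ f ∈ g, ∀ f' ∈ g, sfx c f.1 = sfx c f'.1) (hg : g ≠ []) :
    optList (Lof c g) (k2 (c + 1) e) = sfx (c + 1) e.1 := by
  have hhead : g.headD defEntry ∈ g := by
    match g with
    | [] => exact absurd rfl hg
    | x :: t => exact List.mem_cons_self
  have hL : sfx c e.1 = Lof c g := hsh e he _ hhead
  rw [← hL]
  show optList (sfx c e.1) (altKey (c + 1) e.1) = sfx (c + 1) e.1
  rw [← sfx_succ_optList]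

theorem blockTranslate (c : Nat) (g : List Entry)
    (hok : ∀ e ∈ g, EntOk e) (hsh : ∀ e ∈ g, ∀ f ∈ g, sfx c e.1 = sfx c f.1) :
    blockExpr (fun e => path_suffix e.2 (c + 1)) Prod.snd g = tb c g := by
  match g, hok, hsh with
  | [], _, _ => simp [blockExpr, tb]
  | e0 :: g', hok, hsh =>
    set g := e0 :: g' with hg
    have hgne : g ≠ [] := by simp [hg]
    have hkey : ∀ e ∈ g, path_suffix e.2 (c + 1)
        = PySem.Str.join "/" (optList (Lof c g) (k2 (c + 1) e)) := by
      intro e he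
      rw [optList_sfx c g e he hsh hgne, ← suffix_eq c e (hok e he).1]
      rfl
    have hinj : ∀ k ∈ g.map (k2 (c + 1)), ∀ k' ∈ g.map (k2 (c + 1)),
        PySem.Str.join "/" (optList (Lof c g) k) = PySem.Str.join "/" (optList (Lof c g) k')
        → k = k' := by
      intro k hk k' hk' hj
      simp only [List.mem_map] at hk hk'
      obtain ⟨e, he, rfl⟩ := hk
      obtain ⟨e', he', rfl⟩ := hk'
      rw [optList_sfx c g e he hsh hgne, optList_sfx c g e' he' hsh hgne] at hj
      have hl := join_inj _ _ (fun p hp => entry_slashfree e (hok e he) p (mem_sfx hp))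
        (fun p hp => entry_slashfree e' (hok e' he') p (mem_sfx hp))
        (sfx_succ_ne_nil c e.1 (hok e he).2) (sfx_succ_ne_nil c e'.1 (hok e' he').2) hj
      refine optList_inj (Lof c g) ?_
      rw [optList_sfx c g e he hsh hgne, optList_sfx c g e' he' hsh hgne]
      exact hl
    unfold blockExpr tb
    have hmapkey : g.map (fun e => path_suffix e.2 (c + 1))
        = (g.map (k2 (c + 1))).map (fun k => PySem.Str.join "/" (optList (Lof c g) k)) := by
      rw [List.map_map]
      exact List.map_congr_left hkey
    rw [hmapkey, ofList_map_inj _ _ hinj]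
    unfold blockExpr
    simp only [List.map_map]
    refine List.map_congr_left ?_
    intro k hk
    have hkmem : k ∈ g.map (k2 (c + 1)) := by
      have := (PySem.Set.mem_ofList _ _).mp hk; simpa using this
    simp only [Function.comp_def]
    refine congrArg _ (congrArg _ ?_)
    rw [List.map_id]
    refine List.filter_congr ?_
    intro e he
    by_cases hkk : k2 (c + 1) e = k
    · simp [hkk, hkey e he]
    · have hne : path_suffix e.2 (c + 1) ≠ PySem.Str.join "/" (optList (Lof c g) k) := by
        rw [hkey e he]
        intro hj
        exact hkk (hinj _ (List.mem_map_of_mem he) _ hkmem hj)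
      simp [hkk, hne]

-- A's round dict in closed form: the translated concatenation of B's per-group buckets
theorem dictA_items (c : Nat) (gs : GroupsT) (hinv : RoundInv c gs) :
    ((gs.flatten.map Prod.snd).foldl
      (fun d path => d.modify (path_suffix path (c + 1)) [] (· ++ [path])) PySem.Dict.empty).items
    = (gs.map (tb c)).flatten := by
  obtain ⟨hok, hsh, hpw⟩ := hinv
  have h1 : (gs.flatten.map Prod.snd).foldl
      (fun d path => d.modify (path_suffix path (c + 1)) [] (· ++ [path])) PySem.Dict.empty
      = gs.flatten.foldl
      (fun d e => d.modify (path_suffix e.2 (c + 1)) [] (· ++ [Prod.snd e])) PySem.Dict.empty :=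
    List.foldl_map
  rw [h1, groupItems gs.flatten (fun e => path_suffix e.2 (c + 1)) Prod.snd,
    blockFlatten _ _ gs ?_]
  · refine congrArg _ (List.map_congr_left ?_)
    intro g hg
    exact blockTranslate c g (hok g hg) (hsh g hg)
  · refine List.Pairwise.imp_of_mem ?_ hpw
    intro g h hg hh hd e he f hf
    refine k1_cross c e f (hok g hg e he) (hok h hh f hf) ?_
    intro hx
    apply hd e he f hf
    rw [← sfx_sfx c e.1, ← sfx_sfx c f.1, hx]

-- B's group step is a fold of bStep over the closed-form buckets
theorem altGroupStep_eq (count : Nat) (st : GroupsT × PySem.Dict String String) (g : List Entry) :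
    altGroupStep count st g
    = ((blockExpr (fun e => altKey count e.1) id g).map Prod.snd).foldl (bStep count) st := by
  simp only [altGroupStep, PySem.Dict.values]
  rw [groupItems_id g (fun e => altKey count e.1)]
  rfl

-- one group's buckets, processed by A and B in lockstep
theorem foldBuckets (c : Nat) (L : List String) (P : Entry → Prop) :
    ∀ (items : List (Option String × List Entry)),
    (∀ p ∈ items, p.2 ≠ [] ∧ ∀ e ∈ p.2, P e ∧ sfx c e.1 = L ∧ k2 (c + 1) e = p.1) →
    (items.map Prod.fst).Nodup →
    ∀ (stA1 : List String) (flag : Bool) (res : PySem.Dict String String) (next0 : GroupsT),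
    ∃ added : GroupsT,
      (items.map Prod.snd).foldl (bStep (c + 1)) (next0, res)
        = (next0 ++ added,
           ((items.map (fun p => (PySem.Str.join "/" (optList L p.1), p.2.map Prod.snd))).foldl
             (shortenStep (c + 1)) (stA1, flag, res)).2.2) ∧
      ((items.map (fun p => (PySem.Str.join "/" (optList L p.1), p.2.map Prod.snd))).foldl
          (shortenStep (c + 1)) (stA1, flag, res)).1 = stA1 ++ added.flatten.map Prod.snd ∧
      ((items.map (fun p => (PySem.Str.join "/" (optList L p.1), p.2.map Prod.snd))).foldl
          (shortenStep (c + 1)) (stA1, flag, res)).2.1 = (flag || !added.isEmpty) ∧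
      (∀ b ∈ added, ∃ k, k ∈ items.map Prod.fst ∧ b ≠ [] ∧
        ∀ e ∈ b, P e ∧ sfx c e.1 = L ∧ k2 (c + 1) e = k) ∧
      added.Pairwise (distinctAt (c + 1)) := by
  intro items
  induction items with
  | nil =>
    intro _ _ stA1 flag res next0
    exact ⟨[], by simp, by simp, by simp, by simp, by simp⟩
  | cons p items ih =>
    intro hit hnd stA1 flag res next0
    obtain ⟨k, b⟩ := p
    obtain ⟨hb, hbe⟩ := hit (k, b) List.mem_cons_self
    have hit' : ∀ q ∈ items, q.2 ≠ [] ∧ ∀ e ∈ q.2, P e ∧ sfx c e.1 = L ∧ k2 (c + 1) e = q.1 :=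
      fun q hq => hit q (List.mem_cons_of_mem _ hq)
    have hknotin : k ∉ items.map Prod.fst := by
      simp only [List.map_cons, List.nodup_cons] at hnd
      exact hnd.1
    have hnd' : (items.map Prod.fst).Nodup := by
      simp only [List.map_cons, List.nodup_cons] at hnd
      exact hnd.2
    -- the component run shared by this bucket
    have hbsfx : ∀ e ∈ b, sfx (c + 1) e.1 = optList L k := by
      intro e he
      obtain ⟨_, hL, hk⟩ := hbe e he
      calc sfx (c + 1) e.1 = optList (sfx c e.1) (altKey (c + 1) e.1) := sfx_succ_optList c e.1
        _ = optList L (k2 (c + 1) e) := by rw [hL]; rfl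
        _ = optList L k := by rw [hk]
    simp only [List.map_cons, List.foldl_cons]
    by_cases hb1 : b.length = 1
    · obtain ⟨e, rfl⟩ := List.length_eq_one_iff.mp hb1
      have hstepA : shortenStep (c + 1) (stA1, flag, res)
          (PySem.Str.join "/" (optList L k), [e].map Prod.snd)
          = (stA1, flag, res.insert e.2 (PySem.Str.join "/" (optList L k))) := by
        simp [shortenStep, PySem.List.pyGetD_zero_cons]
      have hstepB : bStep (c + 1) (next0, res) [e]
          = (next0, res.insert e.2 (PySem.Str.join "/" (optList L k))) := by
        simp only [bStep, List.length_cons, List.length_nil, PySem.List.pyGetD_zero_cons]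
        rw [PySem.List.slice_from_neg_natCast e.1 (c + 1) (by omega)]
        rw [show e.1.drop (e.1.length - (c + 1)) = sfx (c + 1) e.1 from rfl,
          hbsfx e List.mem_cons_self]
        simp
      rw [hstepA, hstepB]
      obtain ⟨added, h1, h2, h3, h4, h5⟩ := ih hit' hnd' stA1 flag
        (res.insert e.2 (PySem.Str.join "/" (optList L k))) next0
      exact ⟨added, h1, h2, h3,
        fun b' hb' => (h4 b' hb').imp (fun k' hk' => ⟨List.mem_cons_of_mem _ hk'.1, hk'.2⟩), h5⟩
    · by_cases h128 : 128 ≤ c + 1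
      · have hstepA : shortenStep (c + 1) (stA1, flag, res)
            (PySem.Str.join "/" (optList L k), b.map Prod.snd)
            = (stA1, flag, b.foldl (fun r e => r.insert e.2 e.2) res) := by
          unfold shortenStep
          rw [if_neg (by simpa using hb1), if_pos h128]
          rw [List.foldl_map]
        have hstepB : bStep (c + 1) (next0, res) b
            = (next0, b.foldl (fun r e => r.insert e.2 e.2) res) := by
          unfold bStep
          rw [if_neg hb1, if_pos h128]
        rw [hstepA, hstepB]
        obtain ⟨added, h1, h2, h3, h4, h5⟩ := ih hit' hnd' stA1 flag
          (b.foldl (fun r e => r.insert e.2 e.2) res) next0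
        exact ⟨added, h1, h2, h3,
          fun b' hb' => (h4 b' hb').imp (fun k' hk' => ⟨List.mem_cons_of_mem _ hk'.1, hk'.2⟩), h5⟩
      · have hstepA : shortenStep (c + 1) (stA1, flag, res)
            (PySem.Str.join "/" (optList L k), b.map Prod.snd)
            = (stA1 ++ b.map Prod.snd, true, res) := by
          unfold shortenStep
          rw [if_neg (by simpa using hb1), if_neg h128]
        have hstepB : bStep (c + 1) (next0, res) b = (next0 ++ [b], res) := by
          unfold bStep
          rw [if_neg hb1, if_neg h128]
        rw [hstepA, hstepB]
        obtain ⟨added, h1, h2, h3, h4, h5⟩ := ih hit' hnd' (stA1 ++ b.map Prod.snd) true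
          res (next0 ++ [b])
        refine ⟨b :: added, ?_, ?_, ?_, ?_, ?_⟩
        · rw [h1, List.append_assoc]
          rfl
        · rw [h2]
          simp [List.append_assoc]
        · rw [h3]
          simp
        · intro b' hb'
          rcases List.mem_cons.mp hb' with h | h
          · exact ⟨k, by simp, by rw [h]; exact hb, by rw [h]; exact hbe⟩
          · exact (h4 b' h).imp (fun k' hk' => ⟨List.mem_cons_of_mem _ hk'.1, hk'.2⟩)
        · rw [List.pairwise_cons]
          refine ⟨?_, h5⟩
          intro b' hb' e he f hf
          obtain ⟨k', hk'mem, _, hbe'⟩ := h4 b' hb'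
          have hkk' : k ≠ k' := fun h => hknotin (h ▸ hk'mem)
          have hsf : sfx (c + 1) f.1 = optList L k' := by
            obtain ⟨_, hL, hk⟩ := hbe' f hf
            calc sfx (c + 1) f.1 = optList (sfx c f.1) (altKey (c + 1) f.1) := sfx_succ_optList c f.1
              _ = optList L (k2 (c + 1) f) := by rw [hL]; rfl
              _ = optList L k' := by rw [hk]
          rw [hbsfx e he, hsf]
          intro hx
          exact hkk' (optList_inj L hx)

-- the whole round, group by group
theorem foldGroups (c : Nat) :
    ∀ (gs : GroupsT),
    (∀ g ∈ gs, ∀ e ∈ g, EntOk e) →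
    (∀ g ∈ gs, ∀ e ∈ g, ∀ f ∈ g, sfx c e.1 = sfx c f.1) →
    gs.Pairwise (distinctAt c) →
    ∀ (stA1 : List String) (flag : Bool) (res : PySem.Dict String String) (next0 : GroupsT),
    ∃ added : GroupsT,
      gs.foldl (altGroupStep (c + 1)) (next0, res)
        = (next0 ++ added,
           (((gs.map (tb c)).flatten).foldl (shortenStep (c + 1)) (stA1, flag, res)).2.2) ∧
      (((gs.map (tb c)).flatten).foldl (shortenStep (c + 1)) (stA1, flag, res)).1
        = stA1 ++ added.flatten.map Prod.snd ∧
      (((gs.map (tb c)).flatten).foldl (shortenStep (c + 1)) (stA1, flag, res)).2.1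
        = (flag || !added.isEmpty) ∧
      (∀ b ∈ added, ∀ e ∈ b, EntOk e ∧ e ∈ gs.flatten) ∧
      (∀ b ∈ added, ∀ e ∈ b, ∀ f ∈ b, sfx (c + 1) e.1 = sfx (c + 1) f.1) ∧
      added.Pairwise (distinctAt (c + 1)) := by
  intro gs
  induction gs with
  | nil =>
    intro _ _ _ stA1 flag res next0
    exact ⟨[], by simp, by simp, by simp, by simp, by simp, by simp⟩
  | cons g gs ih =>
    intro hok hsh hpw stA1 flag res next0
    have hokg := hok g List.mem_cons_self
    have hshg := hsh g List.mem_cons_self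
    rw [List.pairwise_cons] at hpw
    -- facts about this group's buckets
    have hit : ∀ p ∈ blockExpr (k2 (c + 1)) id g, p.2 ≠ [] ∧
        ∀ e ∈ p.2, (EntOk e ∧ e ∈ g) ∧ sfx c e.1 = Lof c g ∧ k2 (c + 1) e = p.1 := by
      intro p hp
      simp only [blockExpr, List.mem_map] at hp
      obtain ⟨k, hk, rfl⟩ := hp
      have hkw : ∃ e ∈ g, k2 (c + 1) e = k := by
        have := (PySem.Set.mem_ofList _ _).mp hk; simpa using this
      constructor
      · obtain ⟨e, he, hke⟩ := hkw
        simp only [ne_eq, List.map_eq_nil_iff, List.filter_eq_nil_iff, not_forall]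
        exact ⟨e, he, by simp [hke]⟩
      · intro e he
        simp only [List.map_id, List.mem_filter, beq_iff_eq] at he
        have hgne : g ≠ [] := by
          intro h; rw [h] at he; simp at he
        have hhead : g.headD defEntry ∈ g := by
          match g, hgne with
          | x :: t, _ => exact List.mem_cons_self
        exact ⟨⟨hokg e he.1, he.1⟩, hshg e he.1 _ hhead, he.2⟩
    have hndk : ((blockExpr (k2 (c + 1)) id g).map Prod.fst).Nodup := by
      simp only [blockExpr, List.map_map]
      simp only [Function.comp_def]
      rw [show (fun (k : Option String) =>
        (k, (g.filter (fun x => k2 (c + 1) x == k)).map id).1) = fun k => k from rfl]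
      rw [List.map_id_fun']
      exact PySem.Set.nodup_ofList _
    obtain ⟨added₁, hB1, hA1, hF1, hfacts1, hpw1⟩ :=
      foldBuckets c (Lof c g) (fun e => EntOk e ∧ e ∈ g) (blockExpr (k2 (c + 1)) id g)
        hit hndk stA1 flag res next0
    -- one step of B, then the rest
    simp only [List.foldl_cons, List.map_cons, List.flatten_cons, List.foldl_append]
    rw [altGroupStep_eq (c + 1) (next0, res) g]
    rw [show (blockExpr (fun e => altKey (c + 1) e.1) id g) = blockExpr (k2 (c + 1)) id g from rfl]
    rw [hB1]
    rw [show (List.map (fun p => (PySem.Str.join "/" (optList (Lof c g) p.1), List.map Prod.snd p.2))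
      (blockExpr (k2 (c + 1)) id g)) = tb c g from rfl]
    have hsfx1 : ∀ b ∈ added₁, ∀ e ∈ b, ∀ f ∈ b, sfx (c + 1) e.1 = sfx (c + 1) f.1 := by
      intro b hb e he f hf
      obtain ⟨k, _, _, hbe⟩ := hfacts1 b hb
      obtain ⟨_, hLe, hke⟩ := hbe e he
      obtain ⟨_, hLf, hkf⟩ := hbe f hf
      calc sfx (c + 1) e.1 = optList (sfx c e.1) (altKey (c + 1) e.1) := sfx_succ_optList c e.1
        _ = optList (Lof c g) k := by rw [hLe, ← hke]; rfl
        _ = optList (sfx c f.1) (altKey (c + 1) f.1) := by rw [hLf, ← hkf]; rfl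
        _ = sfx (c + 1) f.1 := (sfx_succ_optList c f.1).symm
    obtain ⟨added₂, hB2, hA2, hF2, hfacts2, hsfx2, hpw2⟩ :=
      ih (fun g' hg' => hok g' (List.mem_cons_of_mem _ hg'))
        (fun g' hg' => hsh g' (List.mem_cons_of_mem _ hg'))
        hpw.2
        (stA1 ++ added₁.flatten.map Prod.snd) (flag || !added₁.isEmpty)
        (((tb c g).foldl (shortenStep (c + 1)) (stA1, flag, res)).2.2) (next0 ++ added₁)
    -- align the A-side start state of the tail fold
    have hstA : ((tb c g).foldl (shortenStep (c + 1)) (stA1, flag, res))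
        = (stA1 ++ added₁.flatten.map Prod.snd, (flag || !added₁.isEmpty),
           ((tb c g).foldl (shortenStep (c + 1)) (stA1, flag, res)).2.2) := by
      refine Prod.ext hA1 (Prod.ext hF1 rfl)
    rw [hstA, hB2]
    refine ⟨added₁ ++ added₂, ?_, ?_, ?_, ?_, ?_, ?_⟩
    · rw [List.append_assoc]
    · rw [hA2, List.flatten_append, List.map_append, List.append_assoc]
    · rw [hF2]
      have hie : (added₁ ++ added₂).isEmpty = (added₁.isEmpty && added₂.isEmpty) := by
        cases added₁ <;> simp
      rw [hie]
      cases added₁.isEmpty <;> cases added₂.isEmpty <;> cases flag <;> rfl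
    · intro b hb e he
      rcases List.mem_append.mp hb with h | h
      · obtain ⟨k, _, _, hbe⟩ := hfacts1 b h
        obtain ⟨⟨hek, heg⟩, _, _⟩ := hbe e he
        exact ⟨hek, List.mem_flatten.mpr ⟨g, List.mem_cons_self, heg⟩⟩
      · obtain ⟨hek, hmem⟩ := hfacts2 b h e he
        obtain ⟨g', hg', heg'⟩ := List.mem_flatten.mp hmem
        exact ⟨hek, List.mem_flatten.mpr ⟨g', List.mem_cons_of_mem _ hg', heg'⟩⟩
    · intro b hb e he f hf
      rcases List.mem_append.mp hb with h | h
      · exact hsfx1 b h e he f hf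
      · exact hsfx2 b h e he f hf
    · rw [List.pairwise_append]
      refine ⟨hpw1, hpw2, ?_⟩
      intro b1 hb1 b2 hb2 e he f hf
      obtain ⟨k, _, _, hbe⟩ := hfacts1 b1 hb1
      obtain ⟨⟨_, heg⟩, _, _⟩ := hbe e he
      obtain ⟨_, hfmem⟩ := hfacts2 b2 hb2 f hf
      obtain ⟨g', hg', hfg'⟩ := List.mem_flatten.mp hfmem
      have hdg : distinctAt c g g' := hpw.1 g' hg'
      intro hx
      apply hdg e heg f hfg'
      rw [← sfx_sfx c e.1, ← sfx_sfx c f.1, hx]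

theorem altLoop_nil (fuel c : Nat) (res : PySem.Dict String String) :
    altLoop fuel c [] res = res := by
  cases fuel <;> simp [altLoop]

theorem loopEq : ∀ (fuel c : Nat) (gs : GroupsT) (res : PySem.Dict String String), RoundInv c gs →
    shortenLoop fuel c (gs.flatten.map Prod.snd) res = altLoop fuel c gs res := by
  intro fuel
  induction fuel with
  | zero => intro c gs res _; rfl
  | succ fuel ih =>
    intro c gs res hinv
    by_cases hgs : gs = []
    · subst hgs
      rw [altLoop_nil]
      rfl
    · obtain ⟨added, hB, hA, hF, hfacts, hsfx, hpw'⟩ :=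
        foldGroups c gs hinv.1 hinv.2.1 hinv.2.2 [] false res []
      have hgsne : gs.isEmpty = false := by
        simpa [List.isEmpty_iff] using hgs
      simp only [shortenLoop, altLoop, hgsne, Bool.false_eq_true, if_false]
      rw [dictA_items c gs hinv, hB]
      rw [hF]
      simp only [List.nil_append, Bool.false_or]
      by_cases hadd : added.isEmpty
      · rw [hadd]
        have : added = [] := List.isEmpty_iff.mp hadd
        subst this
        rw [altLoop_nil]
        rfl
      · have haddb : added.isEmpty = false := by
          simp only [Bool.not_eq_true] at hadd; exact hadd
        rw [haddb]
        simp only [Bool.not_false, if_true]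
        rw [hA]
        simp only [List.nil_append]
        exact ih (c + 1) added _
          ⟨fun b hb e he => (hfacts b hb e he).1, hsfx, hpw'⟩

-- ===== VERDICT (by name: the statement is the Claim_ definition above) =====
theorem shorten_paths_spec : Claim_equal_shorten_paths := by
  intro source_paths _
  show shorten_paths source_paths = shorten_paths_alt source_paths
  unfold shorten_paths shorten_paths_alt
  congr 1
  have h := loopEq 129 0 [source_paths.map (fun path => (splitSlash (PySem.Str.replace path "\\" "/"), path))]
    PySem.Dict.empty ?_
  · rw [← h]
    congr 1
    simp [Function.comp_def]
  · refine ⟨?_, ?_, ?_⟩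
    · rintro g hg e he
      simp only [List.mem_singleton] at hg
      subst hg
      simp only [List.mem_map] at he
      obtain ⟨p, _, rfl⟩ := he
      exact ⟨rfl, splitSlash_ne_nil _⟩
    · intro g hg e he f hf
      simp [sfx, List.drop_length]
    · simp
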